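-- pv_equiv track=rewrite | github.com/dougbeckwith/cs50p | problem-set-5/test_plates/plates.py | has_valid_numbers
-- ===== SOURCE A (Python) =====
-- def has_valid_numbers(s):
--     """
--     Check if the provided string adheres to the rule that plate numbers cannot be used
--     in the middle of a plate, and the first number used cannot be a 0.
--
--     Parameters:
--         s (str): The string to be checked.
--
--     Returns:
--         bool: True if the string follows the number placement rules, False otherwise.
--     """
--     first_digit_found = False
--
--     for char in s:
--         # Check if the character is numeric and marks the start of numbers
--         if first_digit_found is False and char == "0":
--             return False
--         if first_digit_found is False and char.isnumeric():
--             first_digit_found = True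
--             continue
--
--         # Check if characters after the first digit are not numeric
--         if first_digit_found is True and not char.isnumeric():
--             return False
--         continue
--     return True
-- ===== SOURCE B (Python) =====
-- def has_valid_numbers(s):
--     # Back-to-front decomposition: strip the trailing digit block, then the
--     # remaining head must contain no digit and the block must not start with '0'.
--     head = s.rstrip("0123456789")
--     if any(c.isnumeric() for c in head):
--         return False
--     tail = s[len(head):]
--     return not tail.startswith("0")
-- ===== Notes on version B (the rewrite author's own statement) =====
-- stated objective: alternative
-- what changed: Replaces A's forward stateful flag scan with a back-to-front decomposition: strip the trailing digit block with rstrip, reject any digit left in the head, and reject a block starting with '0'.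
import Mathlib
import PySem

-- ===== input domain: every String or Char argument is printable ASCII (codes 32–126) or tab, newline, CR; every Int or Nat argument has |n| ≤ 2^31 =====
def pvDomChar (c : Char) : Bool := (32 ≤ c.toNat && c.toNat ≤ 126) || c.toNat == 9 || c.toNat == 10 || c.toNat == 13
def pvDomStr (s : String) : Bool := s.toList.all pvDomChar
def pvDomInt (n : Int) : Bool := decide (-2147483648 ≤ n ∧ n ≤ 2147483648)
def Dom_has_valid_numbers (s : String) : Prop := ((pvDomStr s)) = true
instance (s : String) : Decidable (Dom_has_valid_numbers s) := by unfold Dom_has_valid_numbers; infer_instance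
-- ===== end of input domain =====

-- B replaces A's forward flag-carrying scan with a back-to-front decomposition:
-- strip the trailing digit block, reject a digit in the head or a block starting with '0' (objective: alternative).
-- isnumeric() is ported as PySem.Chars.isdigit, exact on the ASCII domain.

-- ===== PORT A =====
-- loop over the characters carrying the first_digit_found flag, branches in A's order
def pvALoop (firstDigitFound : Bool) : List Char → Bool
  | [] => true
  | c :: rest =>
    if firstDigitFound = false ∧ c = '0' then false
    else if firstDigitFound = false ∧ PySem.Chars.isdigit c then pvALoop true rest
    else if firstDigitFound = true ∧ ¬ PySem.Chars.isdigit c then false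
    else pvALoop firstDigitFound rest

def has_valid_numbers (s : String) : Bool := pvALoop false s.toList

-- ===== PORT B =====
-- head = s.rstrip("0123456789"): drop the trailing digits (dropWhile on the reverse)
def pvHead (l : List Char) : List Char := (l.reverse.dropWhile PySem.Chars.isdigit).reverse

def has_valid_numbers_alt (s : String) : Bool :=
  let l := s.toList
  let head := pvHead l
  if head.any PySem.Chars.isdigit then false
  else
    -- tail = s[len(head):]; not tail.startswith("0")
    match l.drop head.length with
    | [] => true
    | c :: _ => !(c = '0')

-- ===== PRECONDITION & SPEC =====
def Spec_has_valid_numbers (s : String) (out : Bool) : Prop := out = has_valid_numbers_alt s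
instance (s : String) (out : Bool) : Decidable (Spec_has_valid_numbers s out) := by unfold Spec_has_valid_numbers; infer_instance

-- ===== CLAIM (what is proved, stated in full; the proofs are below) =====
def Claim_equal_has_valid_numbers : Prop := ∀ (s : String), Dom_has_valid_numbers s → Spec_has_valid_numbers s (has_valid_numbers s)

-- ===== LEMMAS AND PROOFS =====

-- proof-side bridge: what A computes, as a structural scan for the first digit
def pvFirst : List Char → Bool
  | [] => true
  | c :: rest =>
    if PySem.Chars.isdigit c then
      if c = '0' then false else rest.all PySem.Chars.isdigit
    else pvFirst rest

-- once the flag is set, A just checks every remaining character is a digit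
theorem pvALoop_true (l : List Char) : pvALoop true l = l.all PySem.Chars.isdigit := by
  induction l with
  | nil => rfl
  | cons c rest ih =>
    simp only [pvALoop, List.all_cons]
    by_cases h : PySem.Chars.isdigit c <;> simp [h, ih]

theorem pvALoop_false (l : List Char) : pvALoop false l = pvFirst l := by
  induction l with
  | nil => rfl
  | cons c rest ih =>
    simp only [pvALoop, pvFirst]
    by_cases h0 : c = '0'
    · subst h0; simp [show PySem.Chars.isdigit '0' = true from rfl]
    · by_cases hd : PySem.Chars.isdigit c <;> simp [h0, hd, pvALoop_true, ih]

-- the stripped head of c :: rest, in terms of the head of rest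
theorem pvHead_cons (c : Char) (rest : List Char) :
    pvHead (c :: rest) =
      if PySem.Chars.isdigit c then (if pvHead rest = [] then [] else c :: pvHead rest)
      else c :: pvHead rest := by
  simp only [pvHead, List.reverse_cons, List.dropWhile_append]
  by_cases hd : PySem.Chars.isdigit c
  · by_cases h : rest.reverse.dropWhile PySem.Chars.isdigit = []
    · simp [h, List.dropWhile, hd]
    · simp [h, List.isEmpty_iff, List.reverse_eq_nil_iff]
  · by_cases h : rest.reverse.dropWhile PySem.Chars.isdigit = []
    · simp [h, List.dropWhile, hd]
    · simp [h, List.isEmpty_iff]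

theorem pvHead_nil_iff (l : List Char) : pvHead l = [] ↔ l.all PySem.Chars.isdigit := by
  simp [pvHead, List.dropWhile_eq_nil_iff, List.all_eq_true]

-- B's whole computation on a list
def pvB (l : List Char) : Bool :=
  if (pvHead l).any PySem.Chars.isdigit then false
  else
    match l.drop (pvHead l).length with
    | [] => true
    | c :: _ => !(c = '0')

theorem pvFirst_eq_pvB (l : List Char) : pvFirst l = pvB l := by
  induction l with
  | nil => rfl
  | cons c rest ih =>
    simp only [pvFirst, pvB, pvHead_cons]
    by_cases hd : PySem.Chars.isdigit c
    · simp only [hd, if_pos]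
      by_cases hr : pvHead rest = []
      · -- rest is all digits: head of c::rest is empty, B inspects the first char c
        have hall : rest.all PySem.Chars.isdigit := (pvHead_nil_iff rest).1 hr
        by_cases h0 : c = '0' <;> simp [hr, h0, hall]
      · -- rest is not all digits: the head keeps c, so a digit sits in the head
        have hall : ¬ rest.all PySem.Chars.isdigit := fun h => hr ((pvHead_nil_iff rest).2 h)
        by_cases h0 : c = '0' <;> simp [hr, hd, hall]
    · -- c is not a digit: both sides defer to rest
      rw [ih, pvB]
      simp [hd]

-- ===== VERDICT (by name: the statement is the Claim_ definition above) =====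
theorem has_valid_numbers_spec : Claim_equal_has_valid_numbers := by
  intro s _
  unfold Spec_has_valid_numbers has_valid_numbers has_valid_numbers_alt
  rw [pvALoop_false, pvFirst_eq_pvB]
  rfl
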